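-- pv_equiv track=rewrite | github.com/YunTianZhou/LeetcodeContest | Weekly Contest/Weekly Contest 466/3676. Count Bowl Subarrays.py | bowlSubarrays
-- ===== SOURCE A (Python) =====
-- from typing import List
--
-- def bowlSubarrays(nums: List[int]) -> int:
--     stack = []
--     ans = 0
--     for i, x in enumerate(nums):
--         while stack and nums[stack[-1]] <= x:
--             if i - stack.pop() + 1 >= 3:
--                 ans += 1
--         if stack and i - stack[-1] + 1 >= 3:
--             ans += 1
--         stack.append(i)
--     return ans
-- ===== SOURCE B (Python) =====
-- from typing import List
--
-- def bowlSubarrays(nums: List[int]) -> int: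
--     # Count each bowl once, split by which endpoint "wins":
--     #   + one per left end l whose next >=-element r is at distance >= 2
--     #   + one per right end r whose previous strictly-greater element l is at distance >= 2
--     n = len(nums)
--     ans = 0
--     for l in range(n):
--         r = next((k for k in range(l + 1, n) if nums[k] >= nums[l]), None)
--         if r is not None and r - l >= 2:
--             ans += 1
--     for r in range(n):
--         l = next((k for k in range(r - 1, -1, -1) if nums[k] > nums[r]), None)
--         if l is not None and r - l >= 2:
--             ans += 1
--     return ans
-- ===== Notes on version B (the rewrite author's own statement) =====
-- stated objective: alternative
-- what changed: Replaces the fused single-pass monotonic-stack count with two independent scanning passes: one counts left endpoints whose next >=-element is at distance >= 2, the other counts right endpoints whose previous strictly-greater element is at distance >= 2; the sum counts each bowl exactly once.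
import Mathlib
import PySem

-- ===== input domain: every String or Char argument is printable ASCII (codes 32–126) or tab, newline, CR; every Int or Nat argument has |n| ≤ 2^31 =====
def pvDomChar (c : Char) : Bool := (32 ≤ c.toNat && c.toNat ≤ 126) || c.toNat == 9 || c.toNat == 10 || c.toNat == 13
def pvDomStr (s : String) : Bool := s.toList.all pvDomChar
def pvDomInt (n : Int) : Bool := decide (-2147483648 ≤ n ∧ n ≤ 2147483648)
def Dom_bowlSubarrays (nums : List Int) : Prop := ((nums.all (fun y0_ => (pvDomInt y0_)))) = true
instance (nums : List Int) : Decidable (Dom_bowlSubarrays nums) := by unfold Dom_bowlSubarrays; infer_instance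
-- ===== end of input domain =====

-- B replaces A's fused single-pass monotonic-stack count by two independent scanning passes
-- (next >=-element per left end, previous strictly-greater element per right end); alternative
-- decomposition, not claimed faster.


-- ===== PORT A =====
-- the 'while stack and nums[stack[-1]] <= x' loop; the stack is kept head-first (head = Python's
-- stack[-1], push/pop at the head); nums[stack[-1]] is PySem.List.pyGetD (the loop only pushes
-- in-range indices, so the default is never read)
def bowlPop (nums : List Int) (i : Int) (x : Int) : List Int → Int → List Int × Int
  | [], ans => ([], ans)
  | j :: rest, ans =>
    if PySem.List.pyGetD nums j 0 ≤ x then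
      bowlPop nums i x rest (if i - j + 1 ≥ 3 then ans + 1 else ans)
    else (j :: rest, ans)

-- the body of 'for i, x in enumerate(nums)'
def bowlStep (nums : List Int) (st : List Int × Int) (p : Int × Int) : List Int × Int :=
  let s1 := bowlPop nums p.1 p.2 st.1 st.2
  let ans :=
    match s1.1 with
    | [] => s1.2
    | t :: _ => if p.1 - t + 1 ≥ 3 then s1.2 + 1 else s1.2
  (p.1 :: s1.1, ans)

def bowlSubarrays (nums : List Int) : Int :=
  ((PySem.List.enumerate nums 0).foldl (bowlStep nums) ([], 0)).2

-- ===== PORT B =====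
def bowlSubarrays_alt (nums : List Int) : Int :=
  let n : Int := nums.length
  let a1 := (PySem.List.pyRange 0 n 1).foldl
    (fun ans l =>
      match (PySem.List.pyRange (l+1) n 1).find?
              (fun k => decide (PySem.List.pyGetD nums l 0 ≤ PySem.List.pyGetD nums k 0)) with
      | some r => if r - l ≥ 2 then ans + 1 else ans
      | none => ans) (0 : Int)
  (PySem.List.pyRange 0 n 1).foldl
    (fun ans r =>
      match (PySem.List.pyRange (r-1) (-1) (-1)).find?
              (fun k => decide (PySem.List.pyGetD nums r 0 < PySem.List.pyGetD nums k 0)) with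
      | some l => if r - l ≥ 2 then ans + 1 else ans
      | none => ans) a1

-- ===== PRECONDITION & SPEC =====
def Spec_bowlSubarrays (nums : List Int) (out : Int) : Prop := out = bowlSubarrays_alt nums
instance (nums : List Int) (out : Int) : Decidable (Spec_bowlSubarrays nums out) := by unfold Spec_bowlSubarrays; infer_instance

-- ===== CLAIM (what is proved, stated in full; the proofs are below) =====
def Claim_equal_bowlSubarrays : Prop := ∀ (nums : List Int), Dom_bowlSubarrays nums → Spec_bowlSubarrays nums (bowlSubarrays nums)

-- ===== LEMMAS AND PROOFS =====

-- nums[k] as a total function on Nat indices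
def gD (nums : List Int) (k : Nat) : Int := nums.getD k 0

-- j is 'still on the stack' after processing 0..i-1: everything after j so far is smaller
def keepP (nums : List Int) (i j : Nat) : Bool := decide (∀ k, k < i → j < k → gD nums k < gD nums j)
def keepL (nums : List Int) (i : Nat) : List Nat := (List.range i).filter (keepP nums i)

-- previous strictly-greater index, next greater-or-equal index
def pgsN (nums : List Int) (i : Nat) : Option Nat :=
  (List.range i).reverse.find? (fun j => decide (gD nums i < gD nums j))
def ngeN (nums : List Int) (l : Nat) : Option Nat :=
  (List.range' (l+1) (nums.length - (l+1))).find? (fun k => decide (gD nums l ≤ gD nums k))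

def popCnt (nums : List Int) (i : Nat) : Int :=
  (((keepL nums i).filter (fun j => decide (gD nums j ≤ gD nums i) && decide (j+2 ≤ i))).length : Int)
def topInc (nums : List Int) (i : Nat) : Int :=
  match pgsN nums i with
  | some l => if l + 2 ≤ i then 1 else 0
  | none => 0
def ansRec (nums : List Int) : Nat → Int
  | 0 => 0
  | i+1 => ansRec nums i + popCnt nums i + topInc nums i

def stackM (nums : List Int) (i : Nat) : List Int := ((keepL nums i).reverse).map Int.ofNat

def t1P (nums : List Int) (m l : Nat) : Bool :=
  match ngeN nums l with
  | some r => decide (r < m) && decide (l + 2 ≤ r)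
  | none => false
def t2P (nums : List Int) (i : Nat) : Bool :=
  match pgsN nums i with
  | some l => decide (l + 2 ≤ i)
  | none => false
def T1 (nums : List Int) (m : Nat) : Int := ((List.range nums.length).countP (t1P nums m) : Int)
def T2 (nums : List Int) (m : Nat) : Int := ((List.range m).countP (t2P nums) : Int)

-- generic find? characterisations
lemma find?_range'_eq_some (p : Nat → Bool) (a len k : Nat) :
    (List.range' a len).find? p = some k ↔
      a ≤ k ∧ k < a + len ∧ p k = true ∧ ∀ j, a ≤ j → j < k → p j = false := by
  induction len generalizing a with
  | zero => simp; omega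
  | succ len ih =>
    rw [List.range'_succ, List.find?_cons]
    cases h : p a with
    | true =>
      simp only []
      constructor
      · rintro ⟨rfl⟩; exact ⟨le_refl _, by omega, h, fun j h1 h2 => by omega⟩
      · rintro ⟨h1, h2, h3, h4⟩
        by_cases hk : k = a
        · simp [hk]
        · have := h4 a (le_refl _) (by omega); rw [h] at this; cases this
    | false =>
      simp only []
      rw [ih]
      constructor
      · rintro ⟨h1, h2, h3, h4⟩
        refine ⟨by omega, by omega, h3, fun j hj1 hj2 => ?_⟩
        by_cases hj : j = a
        · subst hj; exact h
        · exact h4 j (by omega) hj2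
      · rintro ⟨h1, h2, h3, h4⟩
        have hka : k ≠ a := fun e => by rw [e, h] at h3; cases h3
        exact ⟨by omega, by omega, h3, fun j hj1 hj2 => h4 j (by omega) hj2⟩

lemma find?_rev_range_eq_some (p : Nat → Bool) (i l : Nat) :
    (List.range i).reverse.find? p = some l ↔
      l < i ∧ p l = true ∧ ∀ k, l < k → k < i → p k = false := by
  induction i with
  | zero => simp
  | succ i ih =>
    rw [List.range_succ, List.reverse_append, List.reverse_singleton, List.singleton_append,
      List.find?_cons]
    cases h : p i with
    | true =>
      simp only []
      constructor
      · rintro ⟨rfl⟩; exact ⟨by omega, h, fun k h1 h2 => by omega⟩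
      · rintro ⟨h1, h2, h3⟩
        by_cases hl : l = i
        · simp [hl]
        · have := h3 i (by omega) (by omega); rw [h] at this; cases this
    | false =>
      simp only []
      rw [ih]
      constructor
      · rintro ⟨h1, h2, h3⟩
        refine ⟨by omega, h2, fun k hk1 hk2 => ?_⟩
        by_cases hk : k = i
        · subst hk; exact h
        · exact h3 k hk1 (by omega)
      · rintro ⟨h1, h2, h3⟩
        have : l ≠ i := fun e => by rw [e, h] at h2; cases h2
        exact ⟨by omega, h2, fun k hk1 hk2 => h3 k hk1 (by omega)⟩

lemma find?_rev_range_eq_none (p : Nat → Bool) (i : Nat) :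
    (List.range i).reverse.find? p = none ↔ ∀ j, j < i → p j = false := by
  rw [List.find?_eq_none]
  constructor
  · intro h j hj
    by_contra hc
    exact h j (by simp [hj]) (by simpa using hc)
  · intro h j hj
    simp at hj
    simp [h j hj]

lemma ngeN_eq_some_iff (nums : List Int) (l r : Nat) :
    ngeN nums l = some r ↔
      l < r ∧ r < nums.length ∧ gD nums l ≤ gD nums r ∧
        ∀ k, l < k → k < r → gD nums k < gD nums l := by
  unfold ngeN
  rw [find?_range'_eq_some]
  constructor
  · rintro ⟨h1, h2, h3, h4⟩
    refine ⟨by omega, by omega, by simpa using h3, fun k hk1 hk2 => ?_⟩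
    have := h4 k (by omega) hk2
    simp at this
    omega
  · rintro ⟨h1, h2, h3, h4⟩
    refine ⟨by omega, by omega, by simpa using h3, fun j hj1 hj2 => ?_⟩
    have := h4 j (by omega) hj2
    simp
    omega

lemma pgsN_eq_some_iff (nums : List Int) (i l : Nat) :
    pgsN nums i = some l ↔
      l < i ∧ gD nums i < gD nums l ∧ ∀ k, l < k → k < i → ¬ gD nums i < gD nums k := by
  unfold pgsN
  rw [find?_rev_range_eq_some]
  constructor
  · rintro ⟨h1, h2, h3⟩
    refine ⟨h1, by simpa using h2, fun k hk1 hk2 => ?_⟩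
    have := h3 k hk1 hk2
    simpa using this
  · rintro ⟨h1, h2, h3⟩
    refine ⟨h1, by simpa using h2, fun k hk1 hk2 => ?_⟩
    simpa using h3 k hk1 hk2

lemma mem_keepL (nums : List Int) (i j : Nat) :
    j ∈ keepL nums i ↔ j < i ∧ ∀ k, k < i → j < k → gD nums k < gD nums j := by
  simp [keepL, keepP, List.mem_filter]

lemma keepL_pairwise_lt (nums : List Int) (i : Nat) : (keepL nums i).Pairwise (· < ·) :=
  List.pairwise_lt_range.filter _

lemma keepL_pairwise_g (nums : List Int) (i : Nat) :
    (keepL nums i).Pairwise (fun a b => gD nums b < gD nums a) := by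
  have h := List.Pairwise.and_mem.mp (keepL_pairwise_lt nums i)
  exact h.imp (by
    rintro a b ⟨ha, hb, hab⟩
    have hb' := (mem_keepL nums i b).mp hb
    have ha' := (mem_keepL nums i a).mp ha
    exact ha'.2 b hb'.1 hab)

lemma keepL_succ (nums : List Int) (i : Nat) :
    keepL nums (i+1) = (keepL nums i).filter (fun j => decide (gD nums i < gD nums j)) ++ [i] := by
  unfold keepL
  rw [List.range_succ, List.filter_append, List.filter_filter]
  congr 1
  · apply List.filter_congr
    intro j hj
    simp only [List.mem_range] at hj
    simp only [keepP]
    rw [Bool.eq_iff_iff]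
    simp only [Bool.and_eq_true, decide_eq_true_eq]
    constructor
    · intro h
      exact ⟨h i (by omega) hj, fun k hk1 hk2 => h k (by omega) hk2⟩
    · rintro ⟨h1, h2⟩ k hk1 hk2
      by_cases hk : k = i
      · subst hk; exact h1
      · exact h2 k (by omega) hk2
  · simp [keepP]
    intro k h1 h2
    omega

lemma chain_getLast?_of_max : ∀ {s : List Nat} {l : Nat}, s.Pairwise (· < ·) →
    l ∈ s → (∀ j ∈ s, j ≤ l) → s.getLast? = some l := by
  intro s
  induction s with
  | nil => intro l _ h; cases h
  | cons a t ih =>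
    intro l hp hl hmax
    cases t with
    | nil =>
      simp at hl ⊢
      omega
    | cons b u =>
      rw [List.getLast?_cons_cons]
      have hp' := hp.of_cons
      have hal : a < b := List.rel_of_pairwise_cons hp (by simp)
      have hlmem : l ∈ b :: u := by
        rcases hl with _ | h
        · -- l = a: but b ≤ l = a contradicts a < b
          exfalso
          have := hmax b (by simp)
          omega
        · assumption
      exact ih hp' hlmem (fun j hj => hmax j (by simp [hj]))

lemma filter_keepL_getLast (nums : List Int) (i : Nat) :
    ((keepL nums i).filter (fun j => decide (gD nums i < gD nums j))).getLast? = pgsN nums i := by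
  cases hp : pgsN nums i with
  | none =>
    rw [List.getLast?_eq_none_iff, List.filter_eq_nil_iff]
    intro j hj
    have hj' := (mem_keepL nums i j).mp hj
    unfold pgsN at hp
    rw [find?_rev_range_eq_none] at hp
    have := hp j hj'.1
    simpa using this
  | some l =>
    obtain ⟨h1, h2, h3⟩ := (pgsN_eq_some_iff nums i l).mp hp
    apply chain_getLast?_of_max ((keepL_pairwise_lt nums i).filter _)
    · rw [List.mem_filter]
      refine ⟨(mem_keepL nums i l).mpr ⟨h1, fun k hk1 hk2 => ?_⟩, by simpa using h2⟩
      have := h3 k hk2 hk1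
      omega
    · intro j hj
      rw [List.mem_filter] at hj
      have hj1 := (mem_keepL nums i j).mp hj.1
      have hj2 : gD nums i < gD nums j := by simpa using hj.2
      by_contra hc
      exact h3 j (by omega) hj1.1 hj2

-- the while loop on a stack with increasing values pops exactly the ≤-prefix
lemma bowlPop_eq (nums : List Int) (i : Nat) (x a : Int) : ∀ (s : List Nat),
    s.Pairwise (fun a b => gD nums a < gD nums b) →
    bowlPop nums (i : Int) x (s.map Int.ofNat) a =
      ((s.filter (fun j => decide (x < gD nums j))).map Int.ofNat,
       a + ((s.filter (fun j => decide (gD nums j ≤ x) && decide (j + 2 ≤ i))).length : Int)) := by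
  intro s
  induction s generalizing a with
  | nil => intro _; simp [bowlPop]
  | cons j rest ih =>
    intro hp
    have hg : PySem.List.pyGetD nums (Int.ofNat j) 0 = gD nums j := by
      simp [Int.ofNat_eq_natCast, PySem.List.pyGetD_natCast, gD]
    rw [List.map_cons]
    unfold bowlPop
    rw [hg]
    by_cases hle : gD nums j ≤ x
    · rw [if_pos hle, ih _ hp.of_cons]
      have hpj : decide (x < gD nums j) = false := by simp; omega
      have hqj : decide (gD nums j ≤ x) = true := by simpa using hle
      simp only [List.filter_cons, hpj, hqj, Bool.false_eq_true, if_false, Bool.true_and,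
        Prod.mk.injEq]
      refine ⟨trivial, ?_⟩
      by_cases hgap : j + 2 ≤ i
      · have h3 : ((i : Int) - Int.ofNat j + 1 ≥ 3) := by
          simp only [Int.ofNat_eq_natCast]; omega
        rw [if_pos h3]
        simp only [hgap, decide_true, if_true, List.length_cons]
        push_cast
        ring
      · have h3 : ¬ ((i : Int) - Int.ofNat j + 1 ≥ 3) := by
          simp only [Int.ofNat_eq_natCast]; omega
        rw [if_neg h3]
        simp only [hgap, decide_false, Bool.false_eq_true, if_false]
    · rw [if_neg hle]
      have hall : ∀ b ∈ rest, gD nums j < gD nums b := fun b hb => List.rel_of_pairwise_cons hp hb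
      have hpj : decide (x < gD nums j) = true := by simp; omega
      have hqj : decide (gD nums j ≤ x) = false := by simp; omega
      have h1 : rest.filter (fun j => decide (x < gD nums j)) = rest := by
        apply List.filter_eq_self.mpr
        intro b hb
        simp only [decide_eq_true_eq]
        have := hall b hb
        omega
      have h2 : rest.filter (fun j => decide (gD nums j ≤ x) && decide (j + 2 ≤ i)) = [] := by
        apply List.filter_eq_nil_iff.mpr
        intro b hb
        have := hall b hb
        simp only [Bool.and_eq_true, decide_eq_true_eq, not_and]
        intro hc
        omega
      simp [hpj, hqj, h1, h2]

lemma bowlStep_model (nums : List Int) (i : Nat) (hi : i < nums.length) (a : Int) :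
    bowlStep nums (stackM nums i, a) ((i : Int), nums[i]) =
      (stackM nums (i+1), a + popCnt nums i + topInc nums i) := by
  have hg : nums[i] = gD nums i := (List.getD_eq_getElem nums 0 hi).symm
  have hrevp : ((keepL nums i).reverse).Pairwise (fun a b => gD nums a < gD nums b) := by
    rw [List.pairwise_reverse]
    exact keepL_pairwise_g nums i
  unfold bowlStep stackM
  simp only [hg]
  rw [bowlPop_eq nums i (gD nums i) a _ hrevp]
  dsimp only
  rw [List.filter_reverse, List.filter_reverse]
  set fl := (keepL nums i).filter (fun j => decide (gD nums i < gD nums j)) with hfl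
  have hcnt : (((keepL nums i).filter
      (fun j => decide (gD nums j ≤ gD nums i) && decide (j + 2 ≤ i))).length : Int)
      = popCnt nums i := rfl
  have hlast := filter_keepL_getLast nums i
  rw [← hfl] at hlast
  have hstack : (i : Int) :: (fl.reverse.map Int.ofNat) =
      ((keepL nums (i+1)).reverse).map Int.ofNat := by
    rw [keepL_succ nums i, List.reverse_append]
    simp [← hfl]
  cases hp : pgsN nums i with
  | none =>
    rw [hp] at hlast
    have : fl = [] := List.getLast?_eq_none_iff.mp hlast
    rw [this]
    simp only [List.reverse_nil, List.map_nil]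
    rw [this] at hstack
    simp only [List.reverse_nil, List.map_nil] at hstack
    refine Prod.ext ?_ ?_
    · simpa using hstack
    · simp [topInc, hp, popCnt]
  | some l =>
    rw [hp] at hlast
    obtain ⟨ys, hys⟩ := List.getLast?_eq_some_iff.mp hlast
    rw [hys] at hstack ⊢
    simp only [List.reverse_append, List.reverse_singleton, List.singleton_append, List.map_cons]
    refine Prod.ext ?_ ?_
    · simpa using hstack
    · simp only [topInc, hp]
      have hl : l < i := ((pgsN_eq_some_iff nums i l).mp hp).1
      split_ifs with h1 h2 h3 <;> simp [popCnt, Int.ofNat_eq_natCast] at * <;> omega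

lemma foldA_inv (nums : List Int) : ∀ i, i ≤ nums.length →
    (PySem.List.enumerate (nums.take i) 0).foldl (bowlStep nums) ([], 0) =
      (stackM nums i, ansRec nums i) := by
  intro i
  induction i with
  | zero =>
    intro _
    simp [stackM, keepL, ansRec]
  | succ i ih =>
    intro hi
    have hilen : i < nums.length := by omega
    have htake : nums.take (i+1) = nums.take i ++ [nums[i]] := by
      rw [List.take_add_one]
      simp [List.getElem?_eq_getElem hilen]
    have hlen : (nums.take i).length = i := by
      simp
      omega
    rw [htake, PySem.List.enumerate_append, List.foldl_append, ih (by omega)]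
    have hone : PySem.List.enumerate [nums[i]] (0 + (nums.take i).length) = [((i : Int), nums[i])] := by
      rw [PySem.List.enumerate_cons, PySem.List.enumerate_nil, hlen]
      norm_num
    rw [hone]
    simp only [List.foldl_cons, List.foldl_nil]
    rw [bowlStep_model nums i hilen]
    rfl

lemma A_eq_ansRec (nums : List Int) : bowlSubarrays nums = ansRec nums nums.length := by
  unfold bowlSubarrays
  have := foldA_inv nums nums.length (le_refl _)
  rw [List.take_length] at this
  rw [this]

-- counting helpers
lemma countP_or_disjoint {p q : Nat → Bool} : ∀ (xs : List Nat),
    (∀ x ∈ xs, ¬(p x = true ∧ q x = true)) →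
    xs.countP (fun x => p x || q x) = xs.countP p + xs.countP q := by
  intro xs
  induction xs with
  | nil => intro _; simp
  | cons x t ih =>
    intro h
    rw [List.countP_cons, List.countP_cons, List.countP_cons, ih (fun y hy => h y (by simp [hy]))]
    have := h x (by simp)
    cases hp : p x <;> cases hq : q x <;> simp [hp, hq] at this ⊢ <;> omega

lemma countP_range_restrict (p : Nat → Bool) (m : Nat) : ∀ (n : Nat), m ≤ n →
    (∀ l, p l = true → l < m) → (List.range n).countP p = (List.range m).countP p := by
  intro n
  induction n with
  | zero =>
    intro h _
    have : m = 0 := by omega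
    rw [this]
  | succ n ih =>
    intro h hp
    by_cases hm : m = n + 1
    · rw [hm]
    · have hpn : p n = false := by
        cases hpn : p n with
        | false => rfl
        | true => have := hp n hpn; omega
      rw [List.range_succ, List.countP_append, ih (by omega) hp]
      simp [hpn]

lemma popCnt_fiber (nums : List Int) (i : Nat) (hi : i < nums.length) :
    (((List.range nums.length).countP
        (fun l => decide (ngeN nums l = some i) && decide (l + 2 ≤ i))) : Int) = popCnt nums i := by
  unfold popCnt keepL
  rw [List.countP_eq_length_filter, List.filter_filter, ← List.countP_eq_length_filter]
  rw [countP_range_restrict _ i nums.length hi.le (fun l hl => ?_)]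
  swap
  · simp only [Bool.and_eq_true, decide_eq_true_eq] at hl
    exact ((ngeN_eq_some_iff nums l i).mp hl.1).1
  rw [List.countP_eq_length_filter]
  refine congrArg (fun k : Nat => (k : Int)) (congrArg List.length (List.filter_congr ?_))
  intro l hl
  simp only [List.mem_range] at hl
  rw [Bool.eq_iff_iff]
  simp only [Bool.and_eq_true, decide_eq_true_eq, keepP, ngeN_eq_some_iff]
  constructor
  · rintro ⟨⟨h1, h2, h3, h4⟩, h5⟩
    exact ⟨⟨h3, h5⟩, fun k hk1 hk2 => h4 k hk2 hk1⟩
  · rintro ⟨⟨h1, h2⟩, h3⟩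
    exact ⟨⟨hl, hi, h1, fun k hk1 hk2 => h3 k hk2 hk1⟩, h2⟩

lemma topInc_eq (nums : List Int) (m : Nat) :
    topInc nums m = if t2P nums m then 1 else 0 := by
  unfold topInc t2P
  cases pgsN nums m with
  | none => rfl
  | some l =>
    by_cases h : l + 2 ≤ m <;> simp [h]

lemma t1P_succ (nums : List Int) (m l : Nat) :
    t1P nums (m+1) l =
      (t1P nums m l || (decide (ngeN nums l = some m) && decide (l + 2 ≤ m))) := by
  unfold t1P
  cases hn : ngeN nums l with
  | none => simp
  | some r =>
    rw [Bool.eq_iff_iff]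
    simp only [Bool.or_eq_true, Bool.and_eq_true, decide_eq_true_eq, Option.some.injEq]
    have hlr : l < r := ((ngeN_eq_some_iff nums l r).mp hn).1
    constructor
    · rintro ⟨h1, h2⟩
      by_cases hr : r < m
      · exact Or.inl ⟨hr, h2⟩
      · exact Or.inr ⟨by omega, by omega⟩
    · rintro (⟨h1, h2⟩ | ⟨h1, h2⟩)
      · exact ⟨by omega, h2⟩
      · exact ⟨by omega, by omega⟩

lemma ansRec_eq_T (nums : List Int) : ∀ m, m ≤ nums.length →
    ansRec nums m = T1 nums m + T2 nums m := by
  intro m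
  induction m with
  | zero =>
    intro _
    have h0 : T1 nums 0 = 0 := by
      unfold T1
      have : (List.range nums.length).countP (t1P nums 0) = 0 := by
        rw [List.countP_eq_zero]
        intro l _
        unfold t1P
        cases ngeN nums l <;> simp
      rw [this]
      rfl
    simp [ansRec, h0, T2]
  | succ m ih =>
    intro hm
    have hmlen : m < nums.length := by omega
    show ansRec nums m + popCnt nums m + topInc nums m = _
    rw [ih (by omega)]
    have hT1 : T1 nums (m+1) = T1 nums m + popCnt nums m := by
      unfold T1
      have : (List.range nums.length).countP (t1P nums (m+1)) =
          (List.range nums.length).countP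
            (fun l => t1P nums m l || (decide (ngeN nums l = some m) && decide (l + 2 ≤ m))) :=
        List.countP_congr (fun l _ => by rw [t1P_succ nums m l])
      have hdisj : ∀ l ∈ List.range nums.length,
          ¬(t1P nums m l = true ∧
            (decide (ngeN nums l = some m) && decide (l + 2 ≤ m)) = true) := by
        rintro l _ ⟨h1, h2⟩
        simp only [Bool.and_eq_true, decide_eq_true_eq] at h2
        unfold t1P at h1
        rw [h2.1] at h1
        simp at h1
      rw [this, countP_or_disjoint _ hdisj]
      push_cast
      rw [popCnt_fiber nums m hmlen]
    have hT2 : T2 nums (m+1) = T2 nums m + topInc nums m := by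
      unfold T2
      rw [List.range_succ, List.countP_append, topInc_eq]
      have : [m].countP (t2P nums) = if t2P nums m then 1 else 0 := by
        cases h : t2P nums m <;> simp [h]
      rw [this]
      push_cast
      split_ifs <;> ring
    rw [hT1, hT2]
    ring

lemma findB1_eq (nums : List Int) (l : Nat) :
    (PySem.List.pyRange ((l : Int)+1) ((nums.length : Int)) 1).find?
      (fun k => decide (PySem.List.pyGetD nums (l : Int) 0 ≤ PySem.List.pyGetD nums k 0)) =
    (ngeN nums l).map Int.ofNat := by
  rw [PySem.List.pyRange_one]
  have harith : (((nums.length : Int)) - ((l : Int)+1)).toNat = nums.length - (l+1) := by omega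
  rw [harith, List.find?_map]
  unfold ngeN
  rw [List.range'_eq_map_range, List.find?_map, Option.map_map]
  have hfun : ((fun k : Nat => (l : Int) + 1 + (k : Int)) ∘ id) =
      (Int.ofNat ∘ fun k : Nat => l + 1 + k) := by
    funext k
    simp [Int.ofNat_eq_natCast]
  have hpred : ((fun k => decide (PySem.List.pyGetD nums (l : Int) 0 ≤ PySem.List.pyGetD nums k 0)) ∘
      (fun k : Nat => (l : Int) + 1 + (k : Int))) =
      ((fun k => decide (gD nums l ≤ gD nums k)) ∘ (fun k : Nat => l + 1 + k)) := by
    funext k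
    simp only [Function.comp]
    have : (l : Int) + 1 + (k : Int) = ((l + 1 + k : Nat) : Int) := by push_cast; ring
    rw [decide_eq_decide, this]
    simp only [PySem.List.pyGetD_natCast, gD]
  rw [hpred]
  congr 1

lemma findB2_eq (nums : List Int) (r : Nat) :
    (PySem.List.pyRange ((r : Int)-1) (-1) (-1)).find?
      (fun k => decide (PySem.List.pyGetD nums (r : Int) 0 < PySem.List.pyGetD nums k 0)) =
    (pgsN nums r).map Int.ofNat := by
  rw [PySem.List.pyRange_neg_one_eq_reverse]
  have h1 : ((-1 : Int) + 1) = 0 := by ring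
  have h2 : ((r : Int) - 1 + 1) = (r : Int) := by ring
  rw [h1, h2, PySem.List.pyRange_zero_nat]
  rw [← List.map_reverse, List.find?_map]
  unfold pgsN
  have : ((fun k => decide (PySem.List.pyGetD nums ((r : Int)) 0 < PySem.List.pyGetD nums k 0)) ∘
      (fun k : Nat => (k : Int))) = (fun j : Nat => decide (gD nums r < gD nums j)) := by
    funext j
    simp only [Function.comp]
    simp [PySem.List.pyGetD_natCast, gD]
  rw [this]
  rfl

lemma foldl_fun_congr {α β : Type} {f g : α → β → α} (init : α) (l : List β)
    (h : ∀ a b, f a b = g a b) : l.foldl f init = l.foldl g init := by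
  have : f = g := funext fun a => funext (h a)
  rw [this]

lemma B_eq_T (nums : List Int) :
    bowlSubarrays_alt nums = T1 nums nums.length + T2 nums nums.length := by
  unfold bowlSubarrays_alt
  dsimp only
  rw [PySem.List.pyRange_zero_nat]
  rw [List.foldl_map, List.foldl_map]
  refine (foldl_fun_congr
      (g := fun (ans : Int) (r : Nat) => if t2P nums r then ans + 1 else ans) _ _ ?_).trans ?_
  · intro ans r
    rw [findB2_eq]
    cases hp : pgsN nums r with
    | none => simp [t2P, hp]
    | some l =>
      simp only [Option.map_some, t2P, hp, Int.ofNat_eq_natCast]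
      have hiff : (((r : Int)) - (l : Int) ≥ 2) ↔ (l + 2 ≤ r) := by omega
      by_cases h : l + 2 ≤ r
      · rw [if_pos (hiff.mpr h)]
        simp [h]
      · rw [if_neg (fun hc => h (hiff.mp hc))]
        simp [h]
  have hinner : (List.range nums.length).foldl
      (fun (ans : Int) (l : Nat) =>
        match (PySem.List.pyRange ((l : Int)+1) ((nums.length : Int)) 1).find?
                (fun k => decide (PySem.List.pyGetD nums (l : Int) 0 ≤ PySem.List.pyGetD nums k 0)) with
        | some r => if r - (l : Int) ≥ 2 then ans + 1 else ans
        | none => ans) 0 = T1 nums nums.length := by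
    refine (foldl_fun_congr
        (g := fun (ans : Int) (l : Nat) => if t1P nums nums.length l then ans + 1 else ans) _ _ ?_).trans ?_
    · intro ans l
      rw [findB1_eq]
      cases hn : ngeN nums l with
      | none => simp [t1P, hn]
      | some r =>
        obtain ⟨hlr, hrn, _, _⟩ := (ngeN_eq_some_iff nums l r).mp hn
        simp only [Option.map_some, t1P, hn, Int.ofNat_eq_natCast]
        have hiff : (((r : Int)) - (l : Int) ≥ 2) ↔ (l + 2 ≤ r) := by omega
        by_cases h : l + 2 ≤ r
        · rw [if_pos (hiff.mpr h)]
          simp [hrn, h]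
        · rw [if_neg (fun hc => h (hiff.mp hc))]
          simp [h]
    · rw [PySem.List.foldl_if_add_one]
      unfold T1
      ring
  rw [hinner, PySem.List.foldl_if_add_one]
  unfold T2
  ring

-- ===== VERDICT (by name: the statement is the Claim_ definition above) =====
theorem bowlSubarrays_spec : Claim_equal_bowlSubarrays := by
  intro nums _
  unfold Spec_bowlSubarrays
  rw [A_eq_ansRec, ansRec_eq_T nums nums.length (le_refl _), B_eq_T]
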